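-- pv_equiv track=rewrite | github.com/ilithiofobik/aoc2022 | src/day22.py | read_instructions
-- ===== SOURCE A (Python) =====
-- from enum import IntEnum
--
-- class DirectionChange(IntEnum):
--     L = 3
--     R = 1
--
-- Instruction = int | DirectionChange
--
-- def read_instructions(line: str) -> list[Instruction]:
--     instructions = []
--     curr = 0
--
--     for c in line.strip():
--         if c.isdigit():
--             curr = curr * 10 + int(c)
--         else:
--             if curr:
--                 instructions.append(curr)
--                 curr = 0
--             instructions.append(DirectionChange.L if c == "L" else DirectionChange.R)
--
--     if curr:
--         instructions.append(curr)
--     return instructions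
-- ===== SOURCE B (Python) =====
-- from enum import IntEnum
--
-- class DirectionChange(IntEnum):
--     L = 3
--     R = 1
--
-- def read_instructions(line: str) -> list:
--     s = line.strip()
--     # phase 1: tokenize into maximal digit runs and single non-digit chars
--     tokens = []
--     i = 0
--     while i < len(s):
--         if s[i].isdigit():
--             j = i
--             while j < len(s) and s[j].isdigit():
--                 j += 1
--             tokens.append(s[i:j])
--             i = j
--         else:
--             tokens.append(s[i])
--             i += 1
--     # phase 2: classify tokens
--     out = []
--     for t in tokens:
--         if t.isdigit():
--             n = int(t)
--             if n:
--                 out.append(n)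
--         else:
--             out.append(DirectionChange.L if t == "L" else DirectionChange.R)
--     return out
-- ===== Notes on version B (the rewrite author's own statement) =====
-- stated objective: idiomatic
-- what changed: B replaces A's fused single scan with a running numeric accumulator by a two-phase tokenize-then-classify pass: it first splits the stripped line into maximal digit-run tokens and single non-digit tokens, then maps each token to an int (dropping zero) or a direction value.
import Mathlib
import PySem

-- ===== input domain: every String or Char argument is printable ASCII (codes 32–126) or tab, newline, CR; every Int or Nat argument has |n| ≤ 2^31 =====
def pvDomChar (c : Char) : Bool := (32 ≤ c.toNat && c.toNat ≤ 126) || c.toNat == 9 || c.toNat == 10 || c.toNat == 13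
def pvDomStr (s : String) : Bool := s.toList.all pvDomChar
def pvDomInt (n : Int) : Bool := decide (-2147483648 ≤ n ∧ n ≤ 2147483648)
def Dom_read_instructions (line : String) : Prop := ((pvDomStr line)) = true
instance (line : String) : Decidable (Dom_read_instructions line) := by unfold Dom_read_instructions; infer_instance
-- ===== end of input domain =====

-- B replaces A's fused scan (running numeric accumulator) by a two-phase
-- tokenize-then-classify pass; objective: more idiomatic decomposition, same cost.

-- ===== PORT A =====
-- the loop of A: state = (instructions so far, curr); the final 'if curr' flush is the [] case
def raLoop : List Char → List Int → Int → List Int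
  | [], acc, curr => if curr ≠ 0 then acc ++ [curr] else acc
  | c :: cs, acc, curr =>
    if PySem.Chars.isdigit c then
      raLoop cs acc (curr * 10 + ((c.toNat : Int) - 48))   -- int(c), exact for a digit char
    else
      raLoop cs ((if curr ≠ 0 then acc ++ [curr] else acc) ++ [if c = 'L' then 3 else 1]) 0

def read_instructions (line : String) : List Int :=
  raLoop (PySem.Str.strip line).toList [] 0

-- ===== PORT B =====
-- phase 1 of Source B: maximal digit runs (inner while = takeWhile/dropWhile), single non-digits
def rbTok : List Char → List (List Char)
  | [] => []
  | c :: cs =>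
    if PySem.Chars.isdigit c then
      (c :: cs.takeWhile PySem.Chars.isdigit) :: rbTok (cs.dropWhile PySem.Chars.isdigit)
    else
      [c] :: rbTok cs
termination_by cs => cs.length
decreasing_by
  · exact Nat.lt_succ_of_le (cs.length_dropWhile_le _)
  · exact Nat.lt_succ_self _

-- int(t): exact for the all-digit ASCII tokens B applies it to
def rbVal (t : List Char) : Int := t.foldl (fun a c => a * 10 + ((c.toNat : Int) - 48)) 0

-- phase 2 of Source B: classify each token
def rbClassify (tokens : List (List Char)) : List Int :=
  tokens.foldl (fun out t =>
    if PySem.Chars.strIsdigit t then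
      (if rbVal t ≠ 0 then out ++ [rbVal t] else out)
    else
      out ++ [if t = ['L'] then 3 else 1]) []

def read_instructions_alt (line : String) : List Int :=
  rbClassify (rbTok (PySem.Str.strip line).toList)

-- ===== PRECONDITION & SPEC =====
def Spec_read_instructions (line : String) (out : List Int) : Prop := out = read_instructions_alt line
instance (line : String) (out : List Int) : Decidable (Spec_read_instructions line out) := by unfold Spec_read_instructions; infer_instance

-- ===== CLAIM (what is proved, stated in full; the proofs are below) =====
def Claim_equal_read_instructions : Prop := ∀ (line : String), Dom_read_instructions line → Spec_read_instructions line (read_instructions line)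

-- ===== LEMMAS AND PROOFS =====

-- what one token contributes
def rbEmit (t : List Char) : List Int :=
  if PySem.Chars.strIsdigit t then
    (if rbVal t ≠ 0 then [rbVal t] else [])
  else
    [if t = ['L'] then 3 else 1]

theorem rbClassify_eq_flatMap (tokens : List (List Char)) :
    rbClassify tokens = tokens.flatMap rbEmit := by
  have h : rbClassify tokens =
      tokens.foldl (fun out t => out ++ rbEmit t) [] := by
    unfold rbClassify
    congr 1
    funext out t
    simp only [rbEmit]
    split_ifs <;> simp
  rw [h, PySem.List.foldl_append_eq_flatMap]
  simp

theorem raLoop_acc (cs : List Char) (acc : List Int) (curr : Int) :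
    raLoop cs acc curr = acc ++ raLoop cs [] curr := by
  induction cs generalizing acc curr with
  | nil => simp only [raLoop]; split_ifs <;> simp
  | cons c cs ih =>
    cases hdig : PySem.Chars.isdigit c with
    | true =>
      simp only [raLoop, hdig, if_true]
      exact ih acc _
    | false =>
      simp only [raLoop, hdig, Bool.false_eq_true, if_false]
      rw [ih]
      conv_rhs => rw [ih]
      split_ifs <;> simp

-- consuming a run of digits just accumulates into curr
theorem raLoop_digits (ds rest : List Char) (curr : Int)
    (h : ∀ c ∈ ds, PySem.Chars.isdigit c = true) :
    raLoop (ds ++ rest) [] curr =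
      raLoop rest [] (ds.foldl (fun a c => a * 10 + ((c.toNat : Int) - 48)) curr) := by
  induction ds generalizing curr with
  | nil => simp
  | cons d ds ih =>
    have hd : PySem.Chars.isdigit d = true := h d (List.mem_cons_self ..)
    simp only [List.cons_append, raLoop, hd, if_true]
    rw [ih _ (fun c hc => h c (List.mem_cons_of_mem _ hc))]
    simp

-- when the remainder does not start with a digit, a pending curr is flushed first
theorem raLoop_flush (rest : List Char) (v : Int)
    (h : ∀ r ∈ rest.head?, PySem.Chars.isdigit r = false) :
    raLoop rest [] v = (if v ≠ 0 then [v] else []) ++ raLoop rest [] 0 := by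
  cases rest with
  | nil => simp only [raLoop]; split_ifs <;> simp_all
  | cons r rs =>
    have hr : PySem.Chars.isdigit r = false := h r rfl
    simp only [raLoop, hr, Bool.false_eq_true, if_false]
    rw [raLoop_acc]
    conv_rhs => rw [raLoop_acc]
    split_ifs <;> simp_all

theorem head?_dropWhile_isdigit (cs : List Char) :
    ∀ r ∈ (cs.dropWhile PySem.Chars.isdigit).head?, PySem.Chars.isdigit r = false := by
  induction cs with
  | nil => simp
  | cons c cs ih =>
    intro r hr
    rw [List.dropWhile_cons] at hr
    by_cases h : PySem.Chars.isdigit c = true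
    · rw [if_pos h] at hr; exact ih r hr
    · rw [if_neg h] at hr; simp at hr; subst hr; simpa using h

theorem main_eq (cs : List Char) : raLoop cs [] 0 = (rbTok cs).flatMap rbEmit := by
  induction cs using rbTok.induct with
  | case1 => simp [raLoop, rbTok]
  | case2 c cs hd ih =>
    have hall : ∀ x ∈ c :: cs.takeWhile PySem.Chars.isdigit, PySem.Chars.isdigit x = true := by
      intro x hx
      rcases List.mem_cons.mp hx with h | h
      · subst h; exact hd
      · exact List.mem_takeWhile_imp h
    have h1 : raLoop (c :: cs) [] 0 =
        raLoop (cs.dropWhile PySem.Chars.isdigit) []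
          (rbVal (c :: cs.takeWhile PySem.Chars.isdigit)) := by
      conv_lhs => rw [← cs.takeWhile_append_dropWhile (p := PySem.Chars.isdigit), ← List.cons_append]
      rw [raLoop_digits _ _ 0 hall]
      rfl
    have hsd : PySem.Chars.strIsdigit (c :: cs.takeWhile PySem.Chars.isdigit) = true := by
      simp [PySem.Chars.strIsdigit, hall]
    rw [h1, raLoop_flush _ _ (head?_dropWhile_isdigit cs), ih, rbTok]
    simp [hd, rbEmit, hsd]
  | case3 c cs hd ih =>
    have hsd : PySem.Chars.strIsdigit [c] = false := by
      simp [PySem.Chars.strIsdigit]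
      simpa using hd
    rw [rbTok]
    simp only [hd, Bool.false_eq_true, if_false, List.flatMap_cons]
    simp only [raLoop, hd, Bool.false_eq_true, if_false]
    rw [raLoop_acc, ih]
    simp [rbEmit, hsd]

-- ===== VERDICT (by name: the statement is the Claim_ definition above) =====
theorem read_instructions_spec : Claim_equal_read_instructions := by
  intro line _
  unfold Spec_read_instructions read_instructions read_instructions_alt
  rw [rbClassify_eq_flatMap, main_eq]
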